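-- pv_equiv track=rewrite | github.com/clumsyyyy/TubesTBFO-CYK-Python-Parser | src/utilities/input1.py | makloGaming
-- ===== SOURCE A (Python) =====
-- def makloGaming(count):
--     for i in range(1, 10, 3):
--         if count % 2 == 0:
--             count += 1
--         else:
--             count -= 2
--     while count <= 128:
--         count //= 2
--     return count
-- ===== SOURCE B (Python) =====
-- def makloGaming(count):
--     # The three parity-driven adjustments collapse to: subtract 3 if even, 6 if odd,
--     # i.e. count - 3 - 3*(count & 1).  The halving phase is a tail recursion:
--     # it returns the value as soon as it exceeds 128, halving (>> 1 == // 2) otherwise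
--     # (on inputs where A's while loop diverges, this recursion never settles either).
--     def settle(c):
--         return c if c > 128 else settle(c >> 1)
--
--     return settle(count - 3 - 3 * (count & 1))
-- ===== Notes on version B (the rewrite author's own statement) =====
-- stated objective: simpler
-- what changed: Collapses the 3-iteration parity-adjusting for-loop into the arithmetic expression count - 3 - 3*(count & 1) and replaces the iterative while-halving with a tail-recursive settle helper using a shift (>> 1) for the floor division.
import Mathlib
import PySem

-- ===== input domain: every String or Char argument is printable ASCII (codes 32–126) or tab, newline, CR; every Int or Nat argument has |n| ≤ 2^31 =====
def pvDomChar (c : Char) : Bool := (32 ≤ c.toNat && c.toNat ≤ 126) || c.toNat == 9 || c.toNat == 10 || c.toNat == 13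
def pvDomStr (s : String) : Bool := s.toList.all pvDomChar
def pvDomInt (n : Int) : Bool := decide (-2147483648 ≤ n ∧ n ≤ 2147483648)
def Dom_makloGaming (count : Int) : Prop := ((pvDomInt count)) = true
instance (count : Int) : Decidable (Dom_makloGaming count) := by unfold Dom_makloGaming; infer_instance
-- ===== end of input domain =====

-- B collapses the 3-iteration parity loop into the arithmetic count-3-3*(count&1) and makes the halving a tail recursion; divergence region is unchanged.


-- ===== PORT A =====
-- fuel-bounded port of A's `while count <= 128: count //= 2`; inside Pre_ the guard
-- is false at entry, so the fuel value is irrelevant (the Python loop diverges otherwise)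
def pvAWhile : Nat → Int → Int
  | 0, c => c
  | f + 1, c => if c ≤ 128 then pvAWhile f (PySem.Int.floordiv c 2) else c

def makloGaming (count : Int) : Int :=
  let c := (PySem.List.pyRange 1 10 3).foldl
    (fun c _ => if PySem.Int.mod c 2 = 0 then c + 1 else c - 2) count
  pvAWhile 1000 c

-- ===== PORT B =====
-- `settle` is Source B's tail recursion, fuel-bounded; Python's `c >> 1` is exactly
-- Int.fdiv c 2 (arithmetic shift = floor division), and `count & 1` is exactly
-- count % 2 with Lean's emod (both are the nonnegative residue for divisor 2).
def pvSettle : Nat → Int → Int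
  | 0, c => c
  | f + 1, c => if 128 < c then c else pvSettle f (Int.fdiv c 2)

def makloGaming_alt (count : Int) : Int :=
  pvSettle 1000 (count - 3 - 3 * (count % 2))

-- ===== PRECONDITION & SPEC =====
-- Pre_ excludes exactly the counts on which A's while loop never terminates (the
-- adjusted count is ≤ 128, and floor-halving then never exceeds 128): A returns
-- only for even count ≥ 132 or odd count ≥ 135.
def Pre_makloGaming (count : Int) : Prop :=
  (count % 2 = 0 ∧ 132 ≤ count) ∨ (count % 2 ≠ 0 ∧ 135 ≤ count)
instance (count : Int) : Decidable (Pre_makloGaming count) := by unfold Pre_makloGaming; infer_instance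
def pvWitness_makloGaming : Int := 132

def Spec_makloGaming (count : Int) (out : Int) : Prop := out = makloGaming_alt count
instance (count : Int) (out : Int) : Decidable (Spec_makloGaming count out) := by unfold Spec_makloGaming; infer_instance

-- ===== CLAIM (what is proved, stated in full; the proofs are below) =====
def Claim_equal_makloGaming : Prop := ∀ (count : Int), Dom_makloGaming count → Pre_makloGaming count → Spec_makloGaming count (makloGaming count)

-- ===== LEMMAS AND PROOFS =====
theorem pvAWhile_of_gt (f : Nat) (c : Int) (h : ¬ c ≤ 128) : pvAWhile f c = c := by
  cases f <;> simp [pvAWhile, h]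

theorem pvSettle_of_gt (f : Nat) (c : Int) (h : 128 < c) : pvSettle f c = c := by
  cases f <;> simp [pvSettle, h]

-- ===== VERDICT (by name: the statement is the Claim_ definition above) =====
theorem makloGaming_spec : Claim_equal_makloGaming := by
  intro count _ hpre
  unfold Spec_makloGaming makloGaming makloGaming_alt
  have hrange : PySem.List.pyRange 1 10 3 = [1, 4, 7] := by decide
  simp only [hrange, List.foldl]
  rcases hpre with ⟨heven, hge⟩ | ⟨hodd, hge⟩
  · have h1 : PySem.Int.mod count 2 = 0 := by
      simp [PySem.Int.mod, Int.fmod_eq_emod]; omega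
    have h2 : ¬ PySem.Int.mod (count + 1) 2 = 0 := by
      simp [PySem.Int.mod, Int.fmod_eq_emod]; omega
    have h3 : ¬ PySem.Int.mod (count + 1 - 2) 2 = 0 := by
      simp [PySem.Int.mod, Int.fmod_eq_emod]; omega
    rw [if_pos h1, if_neg h2, if_neg h3,
        pvAWhile_of_gt _ _ (by omega), pvSettle_of_gt _ _ (by omega)]
    omega
  · have h1 : ¬ PySem.Int.mod count 2 = 0 := by
      simp [PySem.Int.mod, Int.fmod_eq_emod]; omega
    have h2 : ¬ PySem.Int.mod (count - 2) 2 = 0 := by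
      simp [PySem.Int.mod, Int.fmod_eq_emod]; omega
    have h3 : ¬ PySem.Int.mod (count - 2 - 2) 2 = 0 := by
      simp [PySem.Int.mod, Int.fmod_eq_emod]; omega
    rw [if_neg h1, if_neg h2, if_neg h3,
        pvAWhile_of_gt _ _ (by omega), pvSettle_of_gt _ _ (by omega)]
    omega
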